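-- pv_equiv track=rewrite | github.com/stephen-hansen/Advent2021 | 23/p2.py | get_steps
-- ===== SOURCE A (Python) =====
-- def get_steps(label, movfrom, movto):
--     steps = 2 # Initial move out of spot and move into tile
--     checks = [label[movto]]
--     if movfrom > movto:
--         # Hallway to room is inverse
--         movto, movfrom = movfrom, movto
--     # Compute path and step length
--     # Extra step if moving from bottom room
--     steps += movfrom % 4
--     if movto <= 17: # h1, h2
--         # 16 requires extra step and one extra check
--         if movto == 16:
--             steps += 1
--             checks.append(label[17])
--         for k in range(3):
--             if movfrom >= 4*(k+1):
--                 steps += 2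
--                 checks.append(label[18+k])
--     elif movto == 18: # h3
--         for k in range(2):
--             if movfrom >= 4*(k+2):
--                 steps += 2
--                 checks.append(label[19+k])
--     elif movto == 19: # h4 (mid)
--         if movfrom <= 3:
--             steps += 2
--             checks.append(label[18])
--         elif movfrom >= 12:
--             steps += 2
--             checks.append(label[20])
--     elif movto == 20: # h5
--         for k in range(2):
--             if movfrom < 4*(k+1):
--                 steps += 2
--                 checks.append(label[18+k])
--     elif movto >= 21: # h6, h7
--         if movto == 22:
--             steps += 1
--             checks.append(label[21])
--         for k in range(3):
--             if movfrom < 4*(k+1):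
--                 steps += 2
--                 checks.append(label[18+k])
--     # Validate path is available
--     for c in checks:
--         if c != '.':
--             return None
--     return steps
-- ===== SOURCE B (Python) =====
-- # Coordinate-model reimplementation: map every position to a hallway x-coordinate,
-- # derive the step count from the horizontal distance and the exit depth, and the
-- # blocked-check set from the hallway cells strictly between the two coordinates.
--
-- _X2IDX = {1: 17, 3: 18, 5: 19, 7: 20, 9: 21}
--
-- def get_steps(label, movfrom, movto):
--     if movfrom <= movto:
--         f, t = movfrom, movto
--     else:
--         f, t = movto, movfrom
--     # destination x-coordinate on the hallway (h1..h7 at x = 0,1,3,5,7,9,10;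
--     # any non-hallway destination behaves like the nearest hallway end)
--     if t == 16:
--         xd = 0
--     elif t <= 17:
--         xd = 1
--     elif t == 22:
--         xd = 10
--     elif t >= 21:
--         xd = 9
--     elif t == 18:
--         xd = 3
--     elif t == 19:
--         xd = 5
--     else:
--         xd = 7
--     # source room opening x-coordinate (rooms 0..3 open at x = 2,4,6,8)
--     xs = 2 + 2 * min(max(f // 4, 0), 3)
--     lo, hi = (xs, xd) if xs <= xd else (xd, xs)
--     cells = [movto] + [_X2IDX[x] for x in (1, 3, 5, 7, 9) if lo < x < hi]
--     if any(label[c] != '.' for c in cells):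
--         return None
--     return f % 4 + 1 + (hi - lo)
-- ===== Notes on version B (the rewrite author's own statement) =====
-- stated objective: alternative
-- what changed: Replaces A's six-way per-destination branch logic (with unrolled room-passing loops and special cases for positions 16 and 22) by a coordinate model of the burrow: each position maps to a hallway x-coordinate, the step count is exit-depth + horizontal distance, and the blocked-check set is the hallway cells strictly between the two coordinates.
import Mathlib
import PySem

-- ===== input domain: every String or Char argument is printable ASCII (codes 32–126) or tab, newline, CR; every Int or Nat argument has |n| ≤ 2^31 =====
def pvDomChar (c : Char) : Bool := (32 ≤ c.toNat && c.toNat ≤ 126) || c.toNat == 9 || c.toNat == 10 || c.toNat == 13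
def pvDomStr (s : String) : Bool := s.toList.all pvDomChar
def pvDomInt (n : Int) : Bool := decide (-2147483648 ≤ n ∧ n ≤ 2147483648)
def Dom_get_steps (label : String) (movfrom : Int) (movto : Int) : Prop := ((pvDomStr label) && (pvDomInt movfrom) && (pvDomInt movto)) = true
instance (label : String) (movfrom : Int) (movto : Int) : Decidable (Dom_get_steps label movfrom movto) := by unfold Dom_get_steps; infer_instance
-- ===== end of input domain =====

-- B replaces A's per-branch case analysis by a hallway coordinate model: steps from
-- horizontal distance + exit depth, blocked cells as the hallway cells strictly between
-- the two coordinates (objective: alternative decomposition, same cost).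

-- ===== PORT A =====
def get_steps (label : String) (movfrom : Int) (movto : Int) : Option Int :=
  let steps : Int := 2
  let checks : List (Option Char) := [PySem.Str.pyGet? label movto]
  let p : Int × Int := if movfrom > movto then (movto, movfrom) else (movfrom, movto)
  let movfrom := p.1
  let movto := p.2
  let steps := steps + PySem.Int.mod movfrom 4
  let sc : Int × List (Option Char) :=
    if movto ≤ 17 then
      let sc0 : Int × List (Option Char) :=
        if movto = 16 then (steps + 1, checks ++ [PySem.Str.pyGet? label 17]) else (steps, checks)
      (List.range 3).foldl (fun sc k =>
        if movfrom ≥ 4 * ((k : Int) + 1) then (sc.1 + 2, sc.2 ++ [PySem.Str.pyGet? label (18 + (k : Int))]) else sc) sc0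
    else if movto = 18 then
      (List.range 2).foldl (fun sc k =>
        if movfrom ≥ 4 * ((k : Int) + 2) then (sc.1 + 2, sc.2 ++ [PySem.Str.pyGet? label (19 + (k : Int))]) else sc) (steps, checks)
    else if movto = 19 then
      if movfrom ≤ 3 then (steps + 2, checks ++ [PySem.Str.pyGet? label 18])
      else if movfrom ≥ 12 then (steps + 2, checks ++ [PySem.Str.pyGet? label 20])
      else (steps, checks)
    else if movto = 20 then
      (List.range 2).foldl (fun sc k =>
        if movfrom < 4 * ((k : Int) + 1) then (sc.1 + 2, sc.2 ++ [PySem.Str.pyGet? label (18 + (k : Int))]) else sc) (steps, checks)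
    else if movto ≥ 21 then
      let sc0 : Int × List (Option Char) :=
        if movto = 22 then (steps + 1, checks ++ [PySem.Str.pyGet? label 21]) else (steps, checks)
      (List.range 3).foldl (fun sc k =>
        if movfrom < 4 * ((k : Int) + 1) then (sc.1 + 2, sc.2 ++ [PySem.Str.pyGet? label (18 + (k : Int))]) else sc) sc0
    else (steps, checks)
  if sc.2.any (fun c => c ≠ some '.') then none else some sc.1

-- ===== PORT B =====
-- B-side helper: the dict _X2IDX (hallway x-coordinate → position index)
def x2idx (x : Int) : Int :=
  if x = 1 then 17 else if x = 3 then 18 else if x = 5 then 19 else if x = 7 then 20 else 21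

def get_steps_alt (label : String) (movfrom : Int) (movto : Int) : Option Int :=
  let p : Int × Int := if movfrom ≤ movto then (movfrom, movto) else (movto, movfrom)
  let f := p.1
  let t := p.2
  let xd : Int :=
    if t = 16 then 0
    else if t ≤ 17 then 1
    else if t = 22 then 10
    else if t ≥ 21 then 9
    else if t = 18 then 3
    else if t = 19 then 5
    else 7
  let xs : Int := 2 + 2 * min (max (PySem.Int.floordiv f 4) 0) 3
  let q : Int × Int := if xs ≤ xd then (xs, xd) else (xd, xs)
  let lo := q.1
  let hi := q.2
  let cells : List Int := movto :: (([1, 3, 5, 7, 9] : List Int).filter (fun x => lo < x ∧ x < hi)).map x2idx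
  if cells.any (fun c => PySem.Str.pyGet? label c ≠ some '.') then none else some (PySem.Int.mod f 4 + 1 + (hi - lo))

-- ===== PRECONDITION & SPEC =====
-- Pre_ excludes exactly the inputs where Python A raises an IndexError: the original
-- movto index must be in range, and every hallway cell the chosen path inspects must exist.
def Pre_get_steps (label : String) (movfrom : Int) (movto : Int) : Prop :=
  let n : Int := (label.length : Int)
  let f : Int := min movfrom movto
  let t : Int := max movfrom movto
  PySem.Raise.InRange label.length movto ∧
  (t = 16 → 17 < n) ∧ (t = 22 → 21 < n) ∧
  ((t ≤ 17 ∧ 4 ≤ f) ∨ (19 ≤ t ∧ f ≤ 3) → 18 < n) ∧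
  ((t ≤ 18 ∧ 8 ≤ f) ∨ (20 ≤ t ∧ f ≤ 7) → 19 < n) ∧
  ((t ≤ 19 ∧ 12 ≤ f) ∨ (21 ≤ t ∧ f ≤ 11) → 20 < n)
instance (label : String) (movfrom : Int) (movto : Int) : Decidable (Pre_get_steps label movfrom movto) := by
  unfold Pre_get_steps; infer_instance

def pvWitness_get_steps : String × Int × Int := ("...........ABCD.......", 11, 19)

def Spec_get_steps (label : String) (movfrom : Int) (movto : Int) (out : Option Int) : Prop := out = get_steps_alt label movfrom movto
instance (label : String) (movfrom : Int) (movto : Int) (out : Option Int) : Decidable (Spec_get_steps label movfrom movto out) := by unfold Spec_get_steps; infer_instance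

-- ===== CLAIM (what is proved, stated in full; the proofs are below) =====
def Claim_equal_get_steps : Prop := ∀ (label : String) (movfrom : Int) (movto : Int), Dom_get_steps label movfrom movto → Pre_get_steps label movfrom movto → Spec_get_steps label movfrom movto (get_steps label movfrom movto)

-- ===== LEMMAS AND PROOFS =====
-- proof-side mirrors of the two ports after the initial swap is resolved:
-- coreA/coreB label mv f t = the port body with original movto = mv, (f, t) = (min, max)
def coreA (label : String) (mv f t : Int) : Option Int :=
  let steps : Int := 2 + PySem.Int.mod f 4
  let checks : List (Option Char) := [PySem.Str.pyGet? label mv]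
  let sc : Int × List (Option Char) :=
    if t ≤ 17 then
      let sc0 : Int × List (Option Char) :=
        if t = 16 then (steps + 1, checks ++ [PySem.Str.pyGet? label 17]) else (steps, checks)
      (List.range 3).foldl (fun sc k =>
        if f ≥ 4 * ((k : Int) + 1) then (sc.1 + 2, sc.2 ++ [PySem.Str.pyGet? label (18 + (k : Int))]) else sc) sc0
    else if t = 18 then
      (List.range 2).foldl (fun sc k =>
        if f ≥ 4 * ((k : Int) + 2) then (sc.1 + 2, sc.2 ++ [PySem.Str.pyGet? label (19 + (k : Int))]) else sc) (steps, checks)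
    else if t = 19 then
      if f ≤ 3 then (steps + 2, checks ++ [PySem.Str.pyGet? label 18])
      else if f ≥ 12 then (steps + 2, checks ++ [PySem.Str.pyGet? label 20])
      else (steps, checks)
    else if t = 20 then
      (List.range 2).foldl (fun sc k =>
        if f < 4 * ((k : Int) + 1) then (sc.1 + 2, sc.2 ++ [PySem.Str.pyGet? label (18 + (k : Int))]) else sc) (steps, checks)
    else if t ≥ 21 then
      let sc0 : Int × List (Option Char) :=
        if t = 22 then (steps + 1, checks ++ [PySem.Str.pyGet? label 21]) else (steps, checks)
      (List.range 3).foldl (fun sc k =>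
        if f < 4 * ((k : Int) + 1) then (sc.1 + 2, sc.2 ++ [PySem.Str.pyGet? label (18 + (k : Int))]) else sc) sc0
    else (steps, checks)
  if sc.2.any (fun c => c ≠ some '.') then none else some sc.1

def coreB (label : String) (mv f t : Int) : Option Int :=
  let xd : Int :=
    if t = 16 then 0
    else if t ≤ 17 then 1
    else if t = 22 then 10
    else if t ≥ 21 then 9
    else if t = 18 then 3
    else if t = 19 then 5
    else 7
  let xs : Int := 2 + 2 * min (max (PySem.Int.floordiv f 4) 0) 3
  let q : Int × Int := if xs ≤ xd then (xs, xd) else (xd, xs)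
  let lo := q.1
  let hi := q.2
  let cells : List Int := mv :: (([1, 3, 5, 7, 9] : List Int).filter (fun x => lo < x ∧ x < hi)).map x2idx
  if cells.any (fun c => PySem.Str.pyGet? label c ≠ some '.') then none else some (PySem.Int.mod f 4 + 1 + (hi - lo))



lemma case_t16_r0 (label : String) (mv f t : Int) (ht : t = 16) (hf : f ≤ 3) :
    coreA label mv f t = coreB label mv f t := by
  have hq : 2 + 2 * min (max (f / 4) 0) 3 = 2 := by
    have h : f / 4 ≤ 0 := by omega
    rw [max_eq_right h]; norm_num
  have c1 : ¬ (4 ≤ f) := by omega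
  have c2 : ¬ (8 ≤ f) := by omega
  have c3 : ¬ (12 ≤ f) := by omega
  have c4 : f ≤ 3 := by omega
  have c5 : f < 4 := by omega
  have c6 : f < 8 := by omega
  have c7 : f < 12 := by omega
  subst ht
  norm_num [coreA, coreB, hq, c1, c2, c3, c4, c5, c6, c7, List.range_succ, List.foldl, List.filter, List.map, List.any, x2idx]
  split_ifs <;> simp_all <;> omega

lemma case_t16_r1 (label : String) (mv f t : Int) (ht : t = 16) (hf1 : 4 ≤ f) (hf2 : f ≤ 7) :
    coreA label mv f t = coreB label mv f t := by
  have hq : 2 + 2 * min (max (f / 4) 0) 3 = 4 := by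
    have h : f / 4 = 1 := by omega
    rw [h]; norm_num
  have c1 : 4 ≤ f := by omega
  have c2 : ¬ (8 ≤ f) := by omega
  have c3 : ¬ (12 ≤ f) := by omega
  have c4 : ¬ (f ≤ 3) := by omega
  have c5 : ¬ (f < 4) := by omega
  have c6 : f < 8 := by omega
  have c7 : f < 12 := by omega
  subst ht
  norm_num [coreA, coreB, hq, c1, c2, c3, c4, c5, c6, c7, List.range_succ, List.foldl, List.filter, List.map, List.any, x2idx]
  split_ifs <;> simp_all <;> omega

lemma case_t16_r2 (label : String) (mv f t : Int) (ht : t = 16) (hf1 : 8 ≤ f) (hf2 : f ≤ 11) :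
    coreA label mv f t = coreB label mv f t := by
  have hq : 2 + 2 * min (max (f / 4) 0) 3 = 6 := by
    have h : f / 4 = 2 := by omega
    rw [h]; norm_num
  have c1 : 4 ≤ f := by omega
  have c2 : 8 ≤ f := by omega
  have c3 : ¬ (12 ≤ f) := by omega
  have c4 : ¬ (f ≤ 3) := by omega
  have c5 : ¬ (f < 4) := by omega
  have c6 : ¬ (f < 8) := by omega
  have c7 : f < 12 := by omega
  subst ht
  norm_num [coreA, coreB, hq, c1, c2, c3, c4, c5, c6, c7, List.range_succ, List.foldl, List.filter, List.map, List.any, x2idx]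
  split_ifs <;> simp_all <;> omega

lemma case_t16_r3 (label : String) (mv f t : Int) (ht : t = 16) (hf : 12 ≤ f) :
    coreA label mv f t = coreB label mv f t := by
  have hq : 2 + 2 * min (max (f / 4) 0) 3 = 8 := by
    have h : 3 ≤ f / 4 := by omega
    have h0 : (0:ℤ) ≤ f / 4 := by omega
    rw [max_eq_left h0, min_eq_right h]; norm_num
  have c1 : 4 ≤ f := by omega
  have c2 : 8 ≤ f := by omega
  have c3 : 12 ≤ f := by omega
  have c4 : ¬ (f ≤ 3) := by omega
  have c5 : ¬ (f < 4) := by omega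
  have c6 : ¬ (f < 8) := by omega
  have c7 : ¬ (f < 12) := by omega
  subst ht
  norm_num [coreA, coreB, hq, c1, c2, c3, c4, c5, c6, c7, List.range_succ, List.foldl, List.filter, List.map, List.any, x2idx]
  split_ifs <;> simp_all <;> omega

lemma case_t17_r0 (label : String) (mv f t : Int) (ht1 : t ≤ 17) (ht2 : t ≠ 16) (hf : f ≤ 3) :
    coreA label mv f t = coreB label mv f t := by
  have hq : 2 + 2 * min (max (f / 4) 0) 3 = 2 := by
    have h : f / 4 ≤ 0 := by omega
    rw [max_eq_right h]; norm_num
  have c1 : ¬ (4 ≤ f) := by omega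
  have c2 : ¬ (8 ≤ f) := by omega
  have c3 : ¬ (12 ≤ f) := by omega
  have c4 : f ≤ 3 := by omega
  have c5 : f < 4 := by omega
  have c6 : f < 8 := by omega
  have c7 : f < 12 := by omega
  norm_num [coreA, coreB, hq, c1, c2, c3, c4, c5, c6, c7, ht1, ht2, List.range_succ, List.foldl, List.filter, List.map, List.any, x2idx]
  split_ifs <;> simp_all <;> omega

lemma case_t17_r1 (label : String) (mv f t : Int) (ht1 : t ≤ 17) (ht2 : t ≠ 16) (hf1 : 4 ≤ f) (hf2 : f ≤ 7) :
    coreA label mv f t = coreB label mv f t := by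
  have hq : 2 + 2 * min (max (f / 4) 0) 3 = 4 := by
    have h : f / 4 = 1 := by omega
    rw [h]; norm_num
  have c1 : 4 ≤ f := by omega
  have c2 : ¬ (8 ≤ f) := by omega
  have c3 : ¬ (12 ≤ f) := by omega
  have c4 : ¬ (f ≤ 3) := by omega
  have c5 : ¬ (f < 4) := by omega
  have c6 : f < 8 := by omega
  have c7 : f < 12 := by omega
  norm_num [coreA, coreB, hq, c1, c2, c3, c4, c5, c6, c7, ht1, ht2, List.range_succ, List.foldl, List.filter, List.map, List.any, x2idx]
  split_ifs <;> simp_all <;> omega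

lemma case_t17_r2 (label : String) (mv f t : Int) (ht1 : t ≤ 17) (ht2 : t ≠ 16) (hf1 : 8 ≤ f) (hf2 : f ≤ 11) :
    coreA label mv f t = coreB label mv f t := by
  have hq : 2 + 2 * min (max (f / 4) 0) 3 = 6 := by
    have h : f / 4 = 2 := by omega
    rw [h]; norm_num
  have c1 : 4 ≤ f := by omega
  have c2 : 8 ≤ f := by omega
  have c3 : ¬ (12 ≤ f) := by omega
  have c4 : ¬ (f ≤ 3) := by omega
  have c5 : ¬ (f < 4) := by omega
  have c6 : ¬ (f < 8) := by omega
  have c7 : f < 12 := by omega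
  norm_num [coreA, coreB, hq, c1, c2, c3, c4, c5, c6, c7, ht1, ht2, List.range_succ, List.foldl, List.filter, List.map, List.any, x2idx]
  split_ifs <;> simp_all <;> omega

lemma case_t17_r3 (label : String) (mv f t : Int) (ht1 : t ≤ 17) (ht2 : t ≠ 16) (hf : 12 ≤ f) :
    coreA label mv f t = coreB label mv f t := by
  have hq : 2 + 2 * min (max (f / 4) 0) 3 = 8 := by
    have h : 3 ≤ f / 4 := by omega
    have h0 : (0:ℤ) ≤ f / 4 := by omega
    rw [max_eq_left h0, min_eq_right h]; norm_num
  have c1 : 4 ≤ f := by omega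
  have c2 : 8 ≤ f := by omega
  have c3 : 12 ≤ f := by omega
  have c4 : ¬ (f ≤ 3) := by omega
  have c5 : ¬ (f < 4) := by omega
  have c6 : ¬ (f < 8) := by omega
  have c7 : ¬ (f < 12) := by omega
  norm_num [coreA, coreB, hq, c1, c2, c3, c4, c5, c6, c7, ht1, ht2, List.range_succ, List.foldl, List.filter, List.map, List.any, x2idx]
  split_ifs <;> simp_all <;> omega

lemma case_t18_r0 (label : String) (mv f t : Int) (ht : t = 18) (hf : f ≤ 3) :
    coreA label mv f t = coreB label mv f t := by
  have hq : 2 + 2 * min (max (f / 4) 0) 3 = 2 := by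
    have h : f / 4 ≤ 0 := by omega
    rw [max_eq_right h]; norm_num
  have c1 : ¬ (4 ≤ f) := by omega
  have c2 : ¬ (8 ≤ f) := by omega
  have c3 : ¬ (12 ≤ f) := by omega
  have c4 : f ≤ 3 := by omega
  have c5 : f < 4 := by omega
  have c6 : f < 8 := by omega
  have c7 : f < 12 := by omega
  subst ht
  norm_num [coreA, coreB, hq, c1, c2, c3, c4, c5, c6, c7, List.range_succ, List.foldl, List.filter, List.map, List.any, x2idx]
  split_ifs <;> simp_all <;> omega

lemma case_t18_r1 (label : String) (mv f t : Int) (ht : t = 18) (hf1 : 4 ≤ f) (hf2 : f ≤ 7) :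
    coreA label mv f t = coreB label mv f t := by
  have hq : 2 + 2 * min (max (f / 4) 0) 3 = 4 := by
    have h : f / 4 = 1 := by omega
    rw [h]; norm_num
  have c1 : 4 ≤ f := by omega
  have c2 : ¬ (8 ≤ f) := by omega
  have c3 : ¬ (12 ≤ f) := by omega
  have c4 : ¬ (f ≤ 3) := by omega
  have c5 : ¬ (f < 4) := by omega
  have c6 : f < 8 := by omega
  have c7 : f < 12 := by omega
  subst ht
  norm_num [coreA, coreB, hq, c1, c2, c3, c4, c5, c6, c7, List.range_succ, List.foldl, List.filter, List.map, List.any, x2idx]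
  split_ifs <;> simp_all <;> omega

lemma case_t18_r2 (label : String) (mv f t : Int) (ht : t = 18) (hf1 : 8 ≤ f) (hf2 : f ≤ 11) :
    coreA label mv f t = coreB label mv f t := by
  have hq : 2 + 2 * min (max (f / 4) 0) 3 = 6 := by
    have h : f / 4 = 2 := by omega
    rw [h]; norm_num
  have c1 : 4 ≤ f := by omega
  have c2 : 8 ≤ f := by omega
  have c3 : ¬ (12 ≤ f) := by omega
  have c4 : ¬ (f ≤ 3) := by omega
  have c5 : ¬ (f < 4) := by omega
  have c6 : ¬ (f < 8) := by omega
  have c7 : f < 12 := by omega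
  subst ht
  norm_num [coreA, coreB, hq, c1, c2, c3, c4, c5, c6, c7, List.range_succ, List.foldl, List.filter, List.map, List.any, x2idx]
  split_ifs <;> simp_all <;> omega

lemma case_t18_r3 (label : String) (mv f t : Int) (ht : t = 18) (hf : 12 ≤ f) :
    coreA label mv f t = coreB label mv f t := by
  have hq : 2 + 2 * min (max (f / 4) 0) 3 = 8 := by
    have h : 3 ≤ f / 4 := by omega
    have h0 : (0:ℤ) ≤ f / 4 := by omega
    rw [max_eq_left h0, min_eq_right h]; norm_num
  have c1 : 4 ≤ f := by omega
  have c2 : 8 ≤ f := by omega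
  have c3 : 12 ≤ f := by omega
  have c4 : ¬ (f ≤ 3) := by omega
  have c5 : ¬ (f < 4) := by omega
  have c6 : ¬ (f < 8) := by omega
  have c7 : ¬ (f < 12) := by omega
  subst ht
  norm_num [coreA, coreB, hq, c1, c2, c3, c4, c5, c6, c7, List.range_succ, List.foldl, List.filter, List.map, List.any, x2idx]
  split_ifs <;> simp_all <;> omega

lemma case_t19_r0 (label : String) (mv f t : Int) (ht : t = 19) (hf : f ≤ 3) :
    coreA label mv f t = coreB label mv f t := by
  have hq : 2 + 2 * min (max (f / 4) 0) 3 = 2 := by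
    have h : f / 4 ≤ 0 := by omega
    rw [max_eq_right h]; norm_num
  have c1 : ¬ (4 ≤ f) := by omega
  have c2 : ¬ (8 ≤ f) := by omega
  have c3 : ¬ (12 ≤ f) := by omega
  have c4 : f ≤ 3 := by omega
  have c5 : f < 4 := by omega
  have c6 : f < 8 := by omega
  have c7 : f < 12 := by omega
  subst ht
  norm_num [coreA, coreB, hq, c1, c2, c3, c4, c5, c6, c7, List.range_succ, List.foldl, List.filter, List.map, List.any, x2idx]
  split_ifs <;> simp_all <;> omega

lemma case_t19_r1 (label : String) (mv f t : Int) (ht : t = 19) (hf1 : 4 ≤ f) (hf2 : f ≤ 7) :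
    coreA label mv f t = coreB label mv f t := by
  have hq : 2 + 2 * min (max (f / 4) 0) 3 = 4 := by
    have h : f / 4 = 1 := by omega
    rw [h]; norm_num
  have c1 : 4 ≤ f := by omega
  have c2 : ¬ (8 ≤ f) := by omega
  have c3 : ¬ (12 ≤ f) := by omega
  have c4 : ¬ (f ≤ 3) := by omega
  have c5 : ¬ (f < 4) := by omega
  have c6 : f < 8 := by omega
  have c7 : f < 12 := by omega
  subst ht
  norm_num [coreA, coreB, hq, c1, c2, c3, c4, c5, c6, c7, List.range_succ, List.foldl, List.filter, List.map, List.any, x2idx]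
  split_ifs <;> simp_all <;> omega

lemma case_t19_r2 (label : String) (mv f t : Int) (ht : t = 19) (hf1 : 8 ≤ f) (hf2 : f ≤ 11) :
    coreA label mv f t = coreB label mv f t := by
  have hq : 2 + 2 * min (max (f / 4) 0) 3 = 6 := by
    have h : f / 4 = 2 := by omega
    rw [h]; norm_num
  have c1 : 4 ≤ f := by omega
  have c2 : 8 ≤ f := by omega
  have c3 : ¬ (12 ≤ f) := by omega
  have c4 : ¬ (f ≤ 3) := by omega
  have c5 : ¬ (f < 4) := by omega
  have c6 : ¬ (f < 8) := by omega
  have c7 : f < 12 := by omega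
  subst ht
  norm_num [coreA, coreB, hq, c1, c2, c3, c4, c5, c6, c7, List.range_succ, List.foldl, List.filter, List.map, List.any, x2idx]
  split_ifs <;> simp_all <;> omega

lemma case_t19_r3 (label : String) (mv f t : Int) (ht : t = 19) (hf : 12 ≤ f) :
    coreA label mv f t = coreB label mv f t := by
  have hq : 2 + 2 * min (max (f / 4) 0) 3 = 8 := by
    have h : 3 ≤ f / 4 := by omega
    have h0 : (0:ℤ) ≤ f / 4 := by omega
    rw [max_eq_left h0, min_eq_right h]; norm_num
  have c1 : 4 ≤ f := by omega
  have c2 : 8 ≤ f := by omega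
  have c3 : 12 ≤ f := by omega
  have c4 : ¬ (f ≤ 3) := by omega
  have c5 : ¬ (f < 4) := by omega
  have c6 : ¬ (f < 8) := by omega
  have c7 : ¬ (f < 12) := by omega
  subst ht
  norm_num [coreA, coreB, hq, c1, c2, c3, c4, c5, c6, c7, List.range_succ, List.foldl, List.filter, List.map, List.any, x2idx]
  split_ifs <;> simp_all <;> omega

lemma case_t20_r0 (label : String) (mv f t : Int) (ht : t = 20) (hf : f ≤ 3) :
    coreA label mv f t = coreB label mv f t := by
  have hq : 2 + 2 * min (max (f / 4) 0) 3 = 2 := by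
    have h : f / 4 ≤ 0 := by omega
    rw [max_eq_right h]; norm_num
  have c1 : ¬ (4 ≤ f) := by omega
  have c2 : ¬ (8 ≤ f) := by omega
  have c3 : ¬ (12 ≤ f) := by omega
  have c4 : f ≤ 3 := by omega
  have c5 : f < 4 := by omega
  have c6 : f < 8 := by omega
  have c7 : f < 12 := by omega
  subst ht
  norm_num [coreA, coreB, hq, c1, c2, c3, c4, c5, c6, c7, List.range_succ, List.foldl, List.filter, List.map, List.any, x2idx]
  split_ifs <;> simp_all <;> omega

lemma case_t20_r1 (label : String) (mv f t : Int) (ht : t = 20) (hf1 : 4 ≤ f) (hf2 : f ≤ 7) :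
    coreA label mv f t = coreB label mv f t := by
  have hq : 2 + 2 * min (max (f / 4) 0) 3 = 4 := by
    have h : f / 4 = 1 := by omega
    rw [h]; norm_num
  have c1 : 4 ≤ f := by omega
  have c2 : ¬ (8 ≤ f) := by omega
  have c3 : ¬ (12 ≤ f) := by omega
  have c4 : ¬ (f ≤ 3) := by omega
  have c5 : ¬ (f < 4) := by omega
  have c6 : f < 8 := by omega
  have c7 : f < 12 := by omega
  subst ht
  norm_num [coreA, coreB, hq, c1, c2, c3, c4, c5, c6, c7, List.range_succ, List.foldl, List.filter, List.map, List.any, x2idx]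
  split_ifs <;> simp_all <;> omega

lemma case_t20_r2 (label : String) (mv f t : Int) (ht : t = 20) (hf1 : 8 ≤ f) (hf2 : f ≤ 11) :
    coreA label mv f t = coreB label mv f t := by
  have hq : 2 + 2 * min (max (f / 4) 0) 3 = 6 := by
    have h : f / 4 = 2 := by omega
    rw [h]; norm_num
  have c1 : 4 ≤ f := by omega
  have c2 : 8 ≤ f := by omega
  have c3 : ¬ (12 ≤ f) := by omega
  have c4 : ¬ (f ≤ 3) := by omega
  have c5 : ¬ (f < 4) := by omega
  have c6 : ¬ (f < 8) := by omega
  have c7 : f < 12 := by omega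
  subst ht
  norm_num [coreA, coreB, hq, c1, c2, c3, c4, c5, c6, c7, List.range_succ, List.foldl, List.filter, List.map, List.any, x2idx]
  split_ifs <;> simp_all <;> omega

lemma case_t20_r3 (label : String) (mv f t : Int) (ht : t = 20) (hf : 12 ≤ f) :
    coreA label mv f t = coreB label mv f t := by
  have hq : 2 + 2 * min (max (f / 4) 0) 3 = 8 := by
    have h : 3 ≤ f / 4 := by omega
    have h0 : (0:ℤ) ≤ f / 4 := by omega
    rw [max_eq_left h0, min_eq_right h]; norm_num
  have c1 : 4 ≤ f := by omega
  have c2 : 8 ≤ f := by omega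
  have c3 : 12 ≤ f := by omega
  have c4 : ¬ (f ≤ 3) := by omega
  have c5 : ¬ (f < 4) := by omega
  have c6 : ¬ (f < 8) := by omega
  have c7 : ¬ (f < 12) := by omega
  subst ht
  norm_num [coreA, coreB, hq, c1, c2, c3, c4, c5, c6, c7, List.range_succ, List.foldl, List.filter, List.map, List.any, x2idx]
  split_ifs <;> simp_all <;> omega

lemma case_t22_r0 (label : String) (mv f t : Int) (ht : t = 22) (hf : f ≤ 3) :
    coreA label mv f t = coreB label mv f t := by
  have hq : 2 + 2 * min (max (f / 4) 0) 3 = 2 := by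
    have h : f / 4 ≤ 0 := by omega
    rw [max_eq_right h]; norm_num
  have c1 : ¬ (4 ≤ f) := by omega
  have c2 : ¬ (8 ≤ f) := by omega
  have c3 : ¬ (12 ≤ f) := by omega
  have c4 : f ≤ 3 := by omega
  have c5 : f < 4 := by omega
  have c6 : f < 8 := by omega
  have c7 : f < 12 := by omega
  subst ht
  norm_num [coreA, coreB, hq, c1, c2, c3, c4, c5, c6, c7, List.range_succ, List.foldl, List.filter, List.map, List.any, x2idx]
  split_ifs <;> simp_all <;> omega

lemma case_t22_r1 (label : String) (mv f t : Int) (ht : t = 22) (hf1 : 4 ≤ f) (hf2 : f ≤ 7) :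
    coreA label mv f t = coreB label mv f t := by
  have hq : 2 + 2 * min (max (f / 4) 0) 3 = 4 := by
    have h : f / 4 = 1 := by omega
    rw [h]; norm_num
  have c1 : 4 ≤ f := by omega
  have c2 : ¬ (8 ≤ f) := by omega
  have c3 : ¬ (12 ≤ f) := by omega
  have c4 : ¬ (f ≤ 3) := by omega
  have c5 : ¬ (f < 4) := by omega
  have c6 : f < 8 := by omega
  have c7 : f < 12 := by omega
  subst ht
  norm_num [coreA, coreB, hq, c1, c2, c3, c4, c5, c6, c7, List.range_succ, List.foldl, List.filter, List.map, List.any, x2idx]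
  split_ifs <;> simp_all <;> omega

lemma case_t22_r2 (label : String) (mv f t : Int) (ht : t = 22) (hf1 : 8 ≤ f) (hf2 : f ≤ 11) :
    coreA label mv f t = coreB label mv f t := by
  have hq : 2 + 2 * min (max (f / 4) 0) 3 = 6 := by
    have h : f / 4 = 2 := by omega
    rw [h]; norm_num
  have c1 : 4 ≤ f := by omega
  have c2 : 8 ≤ f := by omega
  have c3 : ¬ (12 ≤ f) := by omega
  have c4 : ¬ (f ≤ 3) := by omega
  have c5 : ¬ (f < 4) := by omega
  have c6 : ¬ (f < 8) := by omega
  have c7 : f < 12 := by omega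
  subst ht
  norm_num [coreA, coreB, hq, c1, c2, c3, c4, c5, c6, c7, List.range_succ, List.foldl, List.filter, List.map, List.any, x2idx]
  split_ifs <;> simp_all <;> omega

lemma case_t22_r3 (label : String) (mv f t : Int) (ht : t = 22) (hf : 12 ≤ f) :
    coreA label mv f t = coreB label mv f t := by
  have hq : 2 + 2 * min (max (f / 4) 0) 3 = 8 := by
    have h : 3 ≤ f / 4 := by omega
    have h0 : (0:ℤ) ≤ f / 4 := by omega
    rw [max_eq_left h0, min_eq_right h]; norm_num
  have c1 : 4 ≤ f := by omega
  have c2 : 8 ≤ f := by omega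
  have c3 : 12 ≤ f := by omega
  have c4 : ¬ (f ≤ 3) := by omega
  have c5 : ¬ (f < 4) := by omega
  have c6 : ¬ (f < 8) := by omega
  have c7 : ¬ (f < 12) := by omega
  subst ht
  norm_num [coreA, coreB, hq, c1, c2, c3, c4, c5, c6, c7, List.range_succ, List.foldl, List.filter, List.map, List.any, x2idx]
  split_ifs <;> simp_all <;> omega

lemma case_t21_r0 (label : String) (mv f t : Int) (ht1 : 21 ≤ t) (ht2 : t ≠ 22) (hf : f ≤ 3) :
    coreA label mv f t = coreB label mv f t := by
  have hq : 2 + 2 * min (max (f / 4) 0) 3 = 2 := by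
    have h : f / 4 ≤ 0 := by omega
    rw [max_eq_right h]; norm_num
  have c1 : ¬ (4 ≤ f) := by omega
  have c2 : ¬ (8 ≤ f) := by omega
  have c3 : ¬ (12 ≤ f) := by omega
  have c4 : f ≤ 3 := by omega
  have c5 : f < 4 := by omega
  have c6 : f < 8 := by omega
  have c7 : f < 12 := by omega
  norm_num [coreA, coreB, hq, c1, c2, c3, c4, c5, c6, c7, (show ¬ (t ≤ 17) from by omega), (show t ≠ 18 from by omega), (show t ≠ 19 from by omega), (show t ≠ 20 from by omega), (show t ≠ 16 from by omega), ht1, ht2, List.range_succ, List.foldl, List.filter, List.map, List.any, x2idx]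
  split_ifs <;> simp_all <;> omega

lemma case_t21_r1 (label : String) (mv f t : Int) (ht1 : 21 ≤ t) (ht2 : t ≠ 22) (hf1 : 4 ≤ f) (hf2 : f ≤ 7) :
    coreA label mv f t = coreB label mv f t := by
  have hq : 2 + 2 * min (max (f / 4) 0) 3 = 4 := by
    have h : f / 4 = 1 := by omega
    rw [h]; norm_num
  have c1 : 4 ≤ f := by omega
  have c2 : ¬ (8 ≤ f) := by omega
  have c3 : ¬ (12 ≤ f) := by omega
  have c4 : ¬ (f ≤ 3) := by omega
  have c5 : ¬ (f < 4) := by omega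
  have c6 : f < 8 := by omega
  have c7 : f < 12 := by omega
  norm_num [coreA, coreB, hq, c1, c2, c3, c4, c5, c6, c7, (show ¬ (t ≤ 17) from by omega), (show t ≠ 18 from by omega), (show t ≠ 19 from by omega), (show t ≠ 20 from by omega), (show t ≠ 16 from by omega), ht1, ht2, List.range_succ, List.foldl, List.filter, List.map, List.any, x2idx]
  split_ifs <;> simp_all <;> omega

lemma case_t21_r2 (label : String) (mv f t : Int) (ht1 : 21 ≤ t) (ht2 : t ≠ 22) (hf1 : 8 ≤ f) (hf2 : f ≤ 11) :
    coreA label mv f t = coreB label mv f t := by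
  have hq : 2 + 2 * min (max (f / 4) 0) 3 = 6 := by
    have h : f / 4 = 2 := by omega
    rw [h]; norm_num
  have c1 : 4 ≤ f := by omega
  have c2 : 8 ≤ f := by omega
  have c3 : ¬ (12 ≤ f) := by omega
  have c4 : ¬ (f ≤ 3) := by omega
  have c5 : ¬ (f < 4) := by omega
  have c6 : ¬ (f < 8) := by omega
  have c7 : f < 12 := by omega
  norm_num [coreA, coreB, hq, c1, c2, c3, c4, c5, c6, c7, (show ¬ (t ≤ 17) from by omega), (show t ≠ 18 from by omega), (show t ≠ 19 from by omega), (show t ≠ 20 from by omega), (show t ≠ 16 from by omega), ht1, ht2, List.range_succ, List.foldl, List.filter, List.map, List.any, x2idx]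
  split_ifs <;> simp_all <;> omega

lemma case_t21_r3 (label : String) (mv f t : Int) (ht1 : 21 ≤ t) (ht2 : t ≠ 22) (hf : 12 ≤ f) :
    coreA label mv f t = coreB label mv f t := by
  have hq : 2 + 2 * min (max (f / 4) 0) 3 = 8 := by
    have h : 3 ≤ f / 4 := by omega
    have h0 : (0:ℤ) ≤ f / 4 := by omega
    rw [max_eq_left h0, min_eq_right h]; norm_num
  have c1 : 4 ≤ f := by omega
  have c2 : 8 ≤ f := by omega
  have c3 : 12 ≤ f := by omega
  have c4 : ¬ (f ≤ 3) := by omega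
  have c5 : ¬ (f < 4) := by omega
  have c6 : ¬ (f < 8) := by omega
  have c7 : ¬ (f < 12) := by omega
  norm_num [coreA, coreB, hq, c1, c2, c3, c4, c5, c6, c7, (show ¬ (t ≤ 17) from by omega), (show t ≠ 18 from by omega), (show t ≠ 19 from by omega), (show t ≠ 20 from by omega), (show t ≠ 16 from by omega), ht1, ht2, List.range_succ, List.foldl, List.filter, List.map, List.any, x2idx]
  split_ifs <;> simp_all <;> omega

lemma core_eq (label : String) (mv f t : Int) :
    coreA label mv f t = coreB label mv f t := by
  by_cases h17 : t ≤ 17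
  · by_cases h16 : t = 16
    · rcases (show f ≤ 3 ∨ (4 ≤ f ∧ f ≤ 7) ∨ (8 ≤ f ∧ f ≤ 11) ∨ 12 ≤ f from by omega) with hf | ⟨hf1, hf2⟩ | ⟨hf1, hf2⟩ | hf
      · exact case_t16_r0 label mv f t h16 hf
      · exact case_t16_r1 label mv f t h16 hf1 hf2
      · exact case_t16_r2 label mv f t h16 hf1 hf2
      · exact case_t16_r3 label mv f t h16 hf
    · rcases (show f ≤ 3 ∨ (4 ≤ f ∧ f ≤ 7) ∨ (8 ≤ f ∧ f ≤ 11) ∨ 12 ≤ f from by omega) with hf | ⟨hf1, hf2⟩ | ⟨hf1, hf2⟩ | hf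
      · exact case_t17_r0 label mv f t h17 h16 hf
      · exact case_t17_r1 label mv f t h17 h16 hf1 hf2
      · exact case_t17_r2 label mv f t h17 h16 hf1 hf2
      · exact case_t17_r3 label mv f t h17 h16 hf
  · rcases (show t = 18 ∨ t = 19 ∨ t = 20 ∨ t = 22 ∨ (21 ≤ t ∧ t ≠ 22) from by omega) with ht | ht | ht | ht | ⟨ht1, ht2⟩ <;>
      rcases (show f ≤ 3 ∨ (4 ≤ f ∧ f ≤ 7) ∨ (8 ≤ f ∧ f ≤ 11) ∨ 12 ≤ f from by omega) with hf | ⟨hf1, hf2⟩ | ⟨hf1, hf2⟩ | hf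
    · exact case_t18_r0 label mv f t ht hf
    · exact case_t18_r1 label mv f t ht hf1 hf2
    · exact case_t18_r2 label mv f t ht hf1 hf2
    · exact case_t18_r3 label mv f t ht hf
    · exact case_t19_r0 label mv f t ht hf
    · exact case_t19_r1 label mv f t ht hf1 hf2
    · exact case_t19_r2 label mv f t ht hf1 hf2
    · exact case_t19_r3 label mv f t ht hf
    · exact case_t20_r0 label mv f t ht hf
    · exact case_t20_r1 label mv f t ht hf1 hf2
    · exact case_t20_r2 label mv f t ht hf1 hf2
    · exact case_t20_r3 label mv f t ht hf
    · exact case_t22_r0 label mv f t ht hf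
    · exact case_t22_r1 label mv f t ht hf1 hf2
    · exact case_t22_r2 label mv f t ht hf1 hf2
    · exact case_t22_r3 label mv f t ht hf
    · exact case_t21_r0 label mv f t ht1 ht2 hf
    · exact case_t21_r1 label mv f t ht1 ht2 hf1 hf2
    · exact case_t21_r2 label mv f t ht1 ht2 hf1 hf2
    · exact case_t21_r3 label mv f t ht1 ht2 hf

lemma A_bridge (label : String) (mf mt : Int) :
    get_steps label mf mt = coreA label mt (min mf mt) (max mf mt) := by
  rcases (show mf ≤ mt ∨ mt < mf from by omega) with h | h
  · rw [min_eq_left h, max_eq_right h]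
    simp only [get_steps, coreA, show ¬ (mf > mt) from by omega, if_false]
  · rw [min_eq_right h.le, max_eq_left h.le]
    simp only [get_steps, coreA, show mf > mt from h, if_true]

lemma B_bridge (label : String) (mf mt : Int) :
    get_steps_alt label mf mt = coreB label mt (min mf mt) (max mf mt) := by
  rcases (show mf ≤ mt ∨ mt < mf from by omega) with h | h
  · rw [min_eq_left h, max_eq_right h]
    simp only [get_steps_alt, coreB, h, if_true]
  · rw [min_eq_right h.le, max_eq_left h.le]
    simp only [get_steps_alt, coreB, show ¬ (mf ≤ mt) from by omega, if_false]

lemma ports_eq (label : String) (movfrom : Int) (movto : Int) :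
    get_steps label movfrom movto = get_steps_alt label movfrom movto := by
  rw [A_bridge, B_bridge, core_eq]

-- ===== VERDICT (by name: the statement is the Claim_ definition above) =====
theorem get_steps_spec : Claim_equal_get_steps := by
  intro label movfrom movto _ _
  exact ports_eq label movfrom movto
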